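-- pv_equiv track=rewrite | github.com/ciromattia/kcc | kindlecomicconverter/image.py | histograms_cutoff
-- ===== SOURCE A (Python) =====
-- def histograms_cutoff(cb_hist, cr_hist, cutoff=(2, 2)):
--     if cutoff == (0, 0):
--         return cb_hist, cr_hist
--
--     for h in cb_hist, cr_hist:
--         # get number of pixels
--         n = sum(h)
--         # remove cutoff% pixels from the low end
--         cut = int(n * cutoff[0] // 100)
--         for lo in range(256):
--             if cut > h[lo]:
--                 cut = cut - h[lo]
--                 h[lo] = 0
--             else:
--                 h[lo] -= cut
--                 cut = 0
--             if cut <= 0: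
--                 break
--         # remove cutoff% samples from the high end
--         cut = int(n * cutoff[1] // 100)
--         for hi in range(255, -1, -1):
--             if cut > h[hi]:
--                 cut = cut - h[hi]
--                 h[hi] = 0
--             else:
--                 h[hi] -= cut
--                 cut = 0
--             if cut <= 0:
--                 break
--     return cb_hist, cr_hist
-- ===== SOURCE B (Python) =====
-- def _clip_tail(h, cut, indices):
--     # prefix-sum scan: prefix[j] = sum of h over indices[0..j]
--     prefix = []
--     s = 0
--     for i in indices:
--         s += h[i]
--         prefix.append(s)
--     # boundary: first position whose prefix sum reaches the cut
--     k = -1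
--     for j in range(len(prefix)):
--         if prefix[j] >= cut:
--             k = j
--             break
--     if k == -1:
--         # cut exceeds the whole mass covered: zero every covered bin
--         for i in indices:
--             h[i] = 0
--     else:
--         # zero the bins strictly before the boundary, leave remainder in bin k
--         for i in indices[:k]:
--             h[i] = 0
--         h[indices[k]] = prefix[k] - cut
--
--
-- def histograms_cutoff(cb_hist, cr_hist, cutoff=(2, 2)):
--     if cutoff == (0, 0):
--         return cb_hist, cr_hist
--     low = list(range(256))
--     high = list(range(255, -1, -1))
--     for h in (cb_hist, cr_hist):
--         n = sum(h)
--         _clip_tail(h, n * cutoff[0] // 100, low)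
--         _clip_tail(h, n * cutoff[1] // 100, high)
--     return cb_hist, cr_hist
-- ===== Notes on version B (the rewrite author's own statement) =====
-- stated objective: alternative
-- what changed: B replaces A's per-bin subtract-and-break loops by a prefix-sum scan: it builds the cumulative sums over the 256 bins, locates the first position where the cumulative sum reaches the cut, zeroes the bins before it in one slice pass and writes the remainder into the boundary bin (symmetrically for the high end via the reversed index list).
import Mathlib
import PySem

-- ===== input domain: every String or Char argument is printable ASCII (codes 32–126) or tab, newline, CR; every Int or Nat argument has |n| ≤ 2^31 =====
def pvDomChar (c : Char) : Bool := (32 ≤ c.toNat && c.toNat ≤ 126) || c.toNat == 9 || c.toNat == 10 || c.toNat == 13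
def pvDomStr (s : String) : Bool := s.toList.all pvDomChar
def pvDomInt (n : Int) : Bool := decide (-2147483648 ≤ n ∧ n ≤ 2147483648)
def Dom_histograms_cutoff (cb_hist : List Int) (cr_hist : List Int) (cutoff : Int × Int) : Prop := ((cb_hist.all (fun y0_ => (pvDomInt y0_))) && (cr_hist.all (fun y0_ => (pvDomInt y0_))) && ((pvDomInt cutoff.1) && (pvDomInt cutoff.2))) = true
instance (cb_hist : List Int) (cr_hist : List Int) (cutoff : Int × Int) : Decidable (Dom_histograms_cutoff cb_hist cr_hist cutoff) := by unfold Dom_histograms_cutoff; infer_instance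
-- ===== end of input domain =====

-- B replaces A's per-bin subtract-and-break loops by a prefix-sum scan that finds the clip
-- boundary and zeroes the bins before it (alternative decomposition, same cost).
-- Python A mutates the two list arguments in place; the equivalence proved here is about the
-- return value only (B performs the same in-place mutation in Python).


-- ===== PORT A =====
-- A's inner loop 'for lo/hi in range(…): if cut > h[i]: … else: …; if cut <= 0: break',
-- transliterated over the index list of the range; pyGet? none = Python IndexError (outside Pre_).
def clipLoopA (h : List Int) (cut : Int) (idxs : List Int) : List Int :=
  match idxs with
  | [] => h
  | i :: rest =>
    match PySem.List.pyGet? h i with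
    | none => h   -- IndexError in Python; excluded by Pre_
    | some v =>
      if cut > v then
        let h' := PySem.List.pySetD h i 0
        let cut' := cut - v
        if cut' ≤ 0 then h' else clipLoopA h' cut' rest
      else
        PySem.List.pySetD h i (v - cut)   -- h[i] -= cut; cut = 0; break

def histograms_cutoff (cb_hist : List Int) (cr_hist : List Int) (cutoff : Int × Int) : List Int × List Int :=
  if cutoff = (0, 0) then (cb_hist, cr_hist)
  else
    let proc : List Int → List Int := fun h =>
      let n := h.sum
      let h1 := clipLoopA h (PySem.Int.floordiv (n * cutoff.1) 100) (PySem.List.pyRange 0 256 1)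
      clipLoopA h1 (PySem.Int.floordiv (n * cutoff.2) 100) (PySem.List.pyRange 255 (-1) (-1))
    (proc cb_hist, proc cr_hist)

-- ===== PORT B =====
-- B's prefix-sum list over the given index list (truncates where Python would raise; outside Pre_).
def prefixSums (h : List Int) (s : Int) (idxs : List Int) : List Int :=
  match idxs with
  | [] => []
  | i :: rest =>
    match PySem.List.pyGet? h i with
    | none => []   -- IndexError in Python; excluded by Pre_
    | some v => (s + v) :: prefixSums h (s + v) rest

def clipTailB (h : List Int) (cut : Int) (idxs : List Int) : List Int :=
  let pref := prefixSums h 0 idxs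
  match pref.findIdx? (fun p => cut ≤ p) with
  | none => idxs.foldl (fun a i => PySem.List.pySetD a i 0) h
  | some k =>
    let h1 := (idxs.take k).foldl (fun a i => PySem.List.pySetD a i 0) h
    match idxs[k]?, pref[k]? with
    | some i, some p => PySem.List.pySetD h1 i (p - cut)
    | _, _ => h1

def histograms_cutoff_alt (cb_hist : List Int) (cr_hist : List Int) (cutoff : Int × Int) : List Int × List Int :=
  if cutoff = (0, 0) then (cb_hist, cr_hist)
  else
    let low := PySem.List.pyRange 0 256 1
    let high := PySem.List.pyRange 255 (-1) (-1)
    let proc : List Int → List Int := fun h =>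
      let n := h.sum
      let h1 := clipTailB h (PySem.Int.floordiv (n * cutoff.1) 100) low
      clipTailB h1 (PySem.Int.floordiv (n * cutoff.2) 100) high
    (proc cb_hist, proc cr_hist)

-- ===== PRECONDITION & SPEC =====
-- A indexes h[0..255] of both histograms (unless cutoff == (0,0) returns early), so it raises
-- IndexError exactly when some histogram is shorter than 256; Pre_ admits exactly the inputs A returns on.
def Pre_histograms_cutoff (cb_hist : List Int) (cr_hist : List Int) (cutoff : Int × Int) : Prop :=
  cutoff = (0, 0) ∨ (256 ≤ cb_hist.length ∧ 256 ≤ cr_hist.length)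
instance (cb_hist : List Int) (cr_hist : List Int) (cutoff : Int × Int) : Decidable (Pre_histograms_cutoff cb_hist cr_hist cutoff) := by unfold Pre_histograms_cutoff; infer_instance

def pvWitness_histograms_cutoff : List Int × List Int × (Int × Int) := ([], [], (0, 0))

def Spec_histograms_cutoff (cb_hist : List Int) (cr_hist : List Int) (cutoff : Int × Int) (out : List Int × List Int) : Prop := out = histograms_cutoff_alt cb_hist cr_hist cutoff
instance (cb_hist : List Int) (cr_hist : List Int) (cutoff : Int × Int) (out : List Int × List Int) : Decidable (Spec_histograms_cutoff cb_hist cr_hist cutoff out) := by unfold Spec_histograms_cutoff; infer_instance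

-- ===== CLAIM (what is proved, stated in full; the proofs are below) =====
def Claim_equal_histograms_cutoff : Prop := ∀ (cb_hist : List Int) (cr_hist : List Int) (cutoff : Int × Int), Dom_histograms_cutoff cb_hist cr_hist cutoff → Pre_histograms_cutoff cb_hist cr_hist cutoff → Spec_histograms_cutoff cb_hist cr_hist cutoff (histograms_cutoff cb_hist cr_hist cutoff)

-- ===== LEMMAS AND PROOFS =====

-- prefixSums with a shifted accumulator is an elementwise shift
lemma prefixSums_shift (idxs : List Int) : ∀ (h : List Int) (s t : Int),
    prefixSums h s idxs = (prefixSums h t idxs).map (fun p => p + (s - t)) := by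
  induction idxs with
  | nil => intro h s t; simp [prefixSums]
  | cons i rest ih =>
    intro h s t
    simp only [prefixSums]
    cases PySem.List.pyGet? h i with
    | none => simp
    | some v =>
      simp only [List.map_cons]
      refine List.cons_eq_cons.mpr ⟨by ring, ?_⟩
      rw [ih h (s + v) (t + v)]
      exact List.map_congr_left (fun p _ => by ring)

-- setting an index not scanned by prefixSums does not change it
lemma prefixSums_set (idxs : List Int) : ∀ (h : List Int) (s : Int) (i : Int) (w : Int),
    0 ≤ i → i ∉ idxs → (∀ j ∈ idxs, 0 ≤ j) →
    prefixSums (h.set i.toNat w) s idxs = prefixSums h s idxs := by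
  induction idxs with
  | nil => intro h s i w _ _ _; simp [prefixSums]
  | cons j rest ih =>
    intro h s i w hi hnm hpos
    have hj : (0:Int) ≤ j := hpos j (by simp)
    have hne : j.toNat ≠ i.toNat := by
      intro hc
      exact hnm (by simp [show j = i by omega])
    simp only [prefixSums]
    rw [PySem.List.pyGet?_of_nonneg (h.set i.toNat w) hj, PySem.List.pyGet?_of_nonneg h hj,
        List.getElem?_set_ne hne.symm]
    cases h[j.toNat]? with
    | none => rfl
    | some v =>
      simp only
      rw [ih h (s + v) i w hi (fun hc => hnm (by simp [hc])) (fun x hx => hpos x (by simp [hx]))]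

lemma clipLoopA_length (idxs : List Int) : ∀ (h : List Int) (cut : Int),
    (clipLoopA h cut idxs).length = h.length := by
  induction idxs with
  | nil => intro h cut; rfl
  | cons i rest ih =>
    intro h cut
    simp only [clipLoopA]
    cases PySem.List.pyGet? h i with
    | none => rfl
    | some v =>
      by_cases hgt : cut > v
      · simp only [if_pos hgt]
        by_cases hle : cut - v ≤ 0
        · simp [hle, PySem.List.length_pySetD]
        · simp [hle, ih, PySem.List.length_pySetD]
      · simp [hgt, PySem.List.length_pySetD]

-- the heart: B's prefix-sum clip satisfies A's recurrence
lemma clipTailB_cons (h : List Int) (cut : Int) (i : Int) (rest : List Int) (v : Int)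
    (hget : PySem.List.pyGet? h i = some v) (hi : 0 ≤ i) (hnm : i ∉ rest)
    (hpos : ∀ j ∈ rest, 0 ≤ j) :
    clipTailB h cut (i :: rest) =
      if cut > v then clipTailB (h.set i.toNat 0) (cut - v) rest
      else PySem.List.pySetD h i (v - cut) := by
  simp only [clipTailB, prefixSums, hget]
  by_cases hgt : cut > v
  · -- first prefix (0 + v) = v does not reach the cut
    have hpred : (decide (cut ≤ 0 + v)) = false := by simp; omega
    rw [if_pos hgt]
    simp only [List.findIdx?_cons, hpred, Bool.false_eq_true, if_false]
    -- relate the two prefix lists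
    have hset : prefixSums (h.set i.toNat 0) 0 rest = prefixSums h 0 rest := by
      rw [show (0:Int) = (0:Int) from rfl]
      exact prefixSums_set rest h 0 i 0 hi hnm hpos
    have hshift : prefixSums h 0 rest = (prefixSums h (0 + v) rest).map (fun p => p + (0 - (0 + v))) :=
      prefixSums_shift rest h 0 (0 + v)
    rw [hset, hshift]
    rw [List.findIdx?_map]
    have hpredeq : ((fun p => decide (cut - v ≤ p)) ∘ (fun p => p + (0 - (0 + v)))) =
        (fun p => decide (cut ≤ p)) := by
      funext p; simp only [Function.comp]; rw [decide_eq_decide]; omega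
    rw [hpredeq]
    cases hfi : (prefixSums h (0 + v) rest).findIdx? (fun p => decide (cut ≤ p)) with
    | none =>
      simp only [Option.map_none, List.foldl_cons]
      rw [PySem.List.pySetD_of_nonneg h 0 hi]
    | some k =>
      simp only [Option.map_some, List.take_succ_cons, List.foldl_cons,
        List.getElem?_cons_succ, List.getElem?_map]
      rw [PySem.List.pySetD_of_nonneg h 0 hi]
      cases hr : rest[k]? with
      | none => simp
      | some j =>
        cases hp : (prefixSums h (0 + v) rest)[k]? with
        | none => simp
        | some p =>
          simp only [Option.map_some]
          have : p + (0 - (0 + v)) - (cut - v) = p - cut := by ring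
          rw [this]
  · -- boundary at the very first bin
    have hpred : (decide (cut ≤ 0 + v)) = true := by simp; omega
    rw [if_neg hgt]
    simp only [List.findIdx?_cons, hpred, if_true, List.take_zero, List.foldl_nil,
      List.getElem?_cons_zero]
    congr 1
    ring

lemma clip_eq (idxs : List Int) : ∀ (h : List Int) (cut : Int),
    (∀ i ∈ idxs, 0 ≤ i ∧ i.toNat < h.length) → idxs.Nodup →
    clipLoopA h cut idxs = clipTailB h cut idxs := by
  induction idxs with
  | nil => intro h cut _ _; simp [clipLoopA, clipTailB, prefixSums]
  | cons i rest ih =>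
    intro h cut hvalid hnd
    obtain ⟨hi0, hilen⟩ := hvalid i (by simp)
    have hget : PySem.List.pyGet? h i = some h[i.toNat] := by
      rw [PySem.List.pyGet?_of_nonneg _ hi0, List.getElem?_eq_getElem hilen]
    have hnm : i ∉ rest := (List.nodup_cons.mp hnd).1
    have hpos : ∀ j ∈ rest, 0 ≤ j := fun j hj => (hvalid j (by simp [hj])).1
    rw [clipTailB_cons h cut i rest h[i.toNat] hget hi0 hnm hpos]
    simp only [clipLoopA, hget]
    by_cases hgt : cut > h[i.toNat]
    · have hle : ¬ (cut - h[i.toNat] ≤ 0) := by omega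
      simp only [if_pos hgt, if_neg hle]
      rw [PySem.List.pySetD_of_nonneg h 0 hi0]
      exact ih (h.set i.toNat 0) (cut - h[i.toNat])
        (fun j hj => ⟨(hvalid j (by simp [hj])).1, by
          have := (hvalid j (by simp [hj])).2; simpa using this⟩)
        (List.nodup_cons.mp hnd).2
    · simp [hgt]

lemma valid_low (h : List Int) (hlen : 256 ≤ h.length) :
    ∀ i ∈ PySem.List.pyRange 0 256 1, 0 ≤ i ∧ i.toNat < h.length := by
  intro i hmem
  rw [PySem.List.mem_pyRange_one] at hmem
  constructor
  · exact hmem.1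
  · omega

lemma valid_high (h : List Int) (hlen : 256 ≤ h.length) :
    ∀ i ∈ PySem.List.pyRange 255 (-1) (-1), 0 ≤ i ∧ i.toNat < h.length := by
  intro i hmem
  rw [PySem.List.mem_pyRange_neg_one] at hmem
  constructor
  · omega
  · omega

lemma nodup_high : (PySem.List.pyRange 255 (-1) (-1)).Nodup := by
  rw [PySem.List.pyRange_neg_one_eq_reverse]
  exact List.nodup_reverse.mpr (PySem.List.nodup_pyRange_one _ _)

-- ===== VERDICT (by name: the statement is the Claim_ definition above) =====
theorem histograms_cutoff_spec : Claim_equal_histograms_cutoff := by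
  intro cb cr cutoff _ hpre
  unfold Spec_histograms_cutoff histograms_cutoff histograms_cutoff_alt
  by_cases hz : cutoff = (0, 0)
  · simp [hz]
  · rcases hpre with hpre | ⟨hcb, hcr⟩
    · exact absurd hpre hz
    simp only [if_neg hz]
    have proc_eq : ∀ (h : List Int), 256 ≤ h.length →
        clipLoopA (clipLoopA h (PySem.Int.floordiv (h.sum * cutoff.1) 100) (PySem.List.pyRange 0 256 1))
            (PySem.Int.floordiv (h.sum * cutoff.2) 100) (PySem.List.pyRange 255 (-1) (-1)) =
        clipTailB (clipTailB h (PySem.Int.floordiv (h.sum * cutoff.1) 100) (PySem.List.pyRange 0 256 1))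
            (PySem.Int.floordiv (h.sum * cutoff.2) 100) (PySem.List.pyRange 255 (-1) (-1)) := by
      intro h hlen
      have h1 : clipLoopA h (PySem.Int.floordiv (h.sum * cutoff.1) 100) (PySem.List.pyRange 0 256 1) =
          clipTailB h (PySem.Int.floordiv (h.sum * cutoff.1) 100) (PySem.List.pyRange 0 256 1) :=
        clip_eq _ h _ (valid_low h hlen) (PySem.List.nodup_pyRange_one 0 256)
      have hlen1 : 256 ≤ (clipLoopA h (PySem.Int.floordiv (h.sum * cutoff.1) 100) (PySem.List.pyRange 0 256 1)).length := by
        rw [clipLoopA_length]; exact hlen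
      rw [← h1]
      exact clip_eq _ _ _ (valid_high _ hlen1) nodup_high
    exact congrArg₂ Prod.mk (proc_eq cb hcb) (proc_eq cr hcr)
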